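-- pv_equiv track=rewrite | github.com/matthew-wolf-n4mtt/F5-Device-Info | F5-Device-Info-v1.py | check_acl_for_loopbacks
-- ===== SOURCE A (Python) =====
-- def check_acl_for_loopbacks(acl_list):
--     local_rc = 0
--
--     for address in acl_list:
--         if address == '127.0.0.0/8':
--             # Case: When on other loopback was found.
--             if local_rc == 0:
--                 local_rc = 1
--             # Case: When the IPv6 loopback was found.
--             if local_rc == 2:
--                 local_rc = 3
--         if address == '::1':
--             # Case: When on other loopback was found.
--             if local_rc == 0:
--                 local_rc = 2
--             # Case: When the IPv4 loopback was found.
--             if local_rc == 1: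
--                 local_rc = 3
--
--     return local_rc
-- ===== SOURCE B (Python) =====
-- def check_acl_for_loopbacks(acl_list):
--     has_v4 = '127.0.0.0/8' in acl_list
--     has_v6 = '::1' in acl_list
--     return (1 if has_v4 else 0) + (2 if has_v6 else 0)
-- ===== Notes on version B (the rewrite author's own statement) =====
-- stated objective: simpler
-- what changed: Replaces A's stateful loop with nested state-transition branches by two direct membership tests combined into a closed-form 2-bit result (1 for IPv4 presence, 2 for IPv6).
import Mathlib
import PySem

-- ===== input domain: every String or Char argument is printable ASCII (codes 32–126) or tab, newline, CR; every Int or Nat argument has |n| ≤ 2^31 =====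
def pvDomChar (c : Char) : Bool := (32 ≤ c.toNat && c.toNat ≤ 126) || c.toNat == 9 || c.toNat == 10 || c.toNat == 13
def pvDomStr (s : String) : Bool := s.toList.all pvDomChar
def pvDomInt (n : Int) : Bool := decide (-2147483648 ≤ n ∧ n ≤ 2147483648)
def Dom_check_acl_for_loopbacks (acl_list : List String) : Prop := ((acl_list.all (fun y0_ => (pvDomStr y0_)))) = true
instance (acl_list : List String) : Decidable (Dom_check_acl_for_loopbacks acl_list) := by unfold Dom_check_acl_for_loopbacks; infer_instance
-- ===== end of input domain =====

-- B replaces A's stateful accumulator loop by two membership tests combined into a closed-form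
-- 2-bit result; objective: simpler.

-- ===== PORT A =====
-- literal transliteration of A's loop body (the four nested ifs, in A's order)
def pvStep (local_rc : Int) (address : String) : Int :=
  let rc1 :=
    if address == "127.0.0.0/8" then
      let a := if local_rc == 0 then 1 else local_rc
      if a == 2 then 3 else a
    else local_rc
  if address == "::1" then
    let b := if rc1 == 0 then 2 else rc1
    if b == 1 then 3 else b
  else rc1

def check_acl_for_loopbacks (acl_list : List String) : Int :=
  acl_list.foldl pvStep 0

-- ===== PORT B =====
def check_acl_for_loopbacks_alt (acl_list : List String) : Int :=
  (if acl_list.contains "127.0.0.0/8" then (1 : Int) else 0)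
    + (if acl_list.contains "::1" then (2 : Int) else 0)

-- ===== PRECONDITION & SPEC =====
def Spec_check_acl_for_loopbacks (acl_list : List String) (out : Int) : Prop := out = check_acl_for_loopbacks_alt acl_list
instance (acl_list : List String) (out : Int) : Decidable (Spec_check_acl_for_loopbacks acl_list out) := by unfold Spec_check_acl_for_loopbacks; infer_instance

-- ===== CLAIM (what is proved, stated in full; the proofs are below) =====
def Claim_equal_check_acl_for_loopbacks : Prop := ∀ (acl_list : List String), Dom_check_acl_for_loopbacks acl_list → Spec_check_acl_for_loopbacks acl_list (check_acl_for_loopbacks acl_list)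

-- ===== LEMMAS AND PROOFS =====

-- encode the two membership bits the way A's state does
def pvEnc (b4 b6 : Bool) : Int := (if b4 then 1 else 0) + (if b6 then 2 else 0)

theorem pvStep_enc (b4 b6 : Bool) (a : String) :
    pvStep (pvEnc b4 b6) a = pvEnc (b4 || ("127.0.0.0/8" == a)) (b6 || ("::1" == a)) := by
  by_cases h4 : a = "127.0.0.0/8"
  · subst h4; cases b4 <;> cases b6 <;> decide
  · by_cases h6 : a = "::1"
    · subst h6; cases b4 <;> cases b6 <;> decide
    · have e4 : (a == "127.0.0.0/8") = false := beq_eq_false_iff_ne.mpr h4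
      have e6 : (a == "::1") = false := beq_eq_false_iff_ne.mpr h6
      have e4' : (("127.0.0.0/8" : String) == a) = false :=
        beq_eq_false_iff_ne.mpr (fun h => h4 h.symm)
      have e6' : (("::1" : String) == a) = false :=
        beq_eq_false_iff_ne.mpr (fun h => h6 h.symm)
      simp [pvStep, e4, e6, e4', e6']

theorem pvLoop_inv (l : List String) (b4 b6 : Bool) :
    l.foldl pvStep (pvEnc b4 b6)
      = pvEnc (b4 || l.contains "127.0.0.0/8") (b6 || l.contains "::1") := by
  induction l generalizing b4 b6 with
  | nil => simp
  | cons a l ih =>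
    rw [List.foldl_cons, pvStep_enc, ih]
    simp [Bool.or_assoc, beq_eq_decide]

-- ===== VERDICT (by name: the statement is the Claim_ definition above) =====
theorem check_acl_for_loopbacks_spec : Claim_equal_check_acl_for_loopbacks := by
  intro acl_list _
  unfold Spec_check_acl_for_loopbacks check_acl_for_loopbacks check_acl_for_loopbacks_alt
  have h := pvLoop_inv acl_list false false
  simpa [pvEnc] using h
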